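-- pv_equiv track=rewrite | github.com/Ynn622/ProfiqAI_backend | services/chip_data.py | calculate_consecutive_status
-- ===== SOURCE A (Python) =====
-- def calculate_consecutive_status(column):
--     result = []
--     last_status = None
--     count = 0
--     for num in column:
--         status = 1 if num >= 0 else -1
--         count = count + 1 if status == last_status else 1
--         last_status = status
--         result.append(status*count)
--     return result
-- ===== SOURCE B (Python) =====
-- def calculate_consecutive_status(column):
--     signs = [1 if num >= 0 else -1 for num in column]
--     result = []
--     i = 0
--     n = len(signs)
--     while i < n:
--         s = signs[i]
--         j = i
--         while j < n and signs[j] == s: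
--             j += 1
--         result.extend(s * k for k in range(1, j - i + 1))
--         i = j
--     return result
-- ===== Notes on version B (the rewrite author's own statement) =====
-- stated objective: alternative
-- what changed: Replaces the flat stateful loop (last_status/count carried across iterations) with a run-detection pass: map to signs, find each maximal run of equal sign, and emit s*1..s*L per run.
import Mathlib
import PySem

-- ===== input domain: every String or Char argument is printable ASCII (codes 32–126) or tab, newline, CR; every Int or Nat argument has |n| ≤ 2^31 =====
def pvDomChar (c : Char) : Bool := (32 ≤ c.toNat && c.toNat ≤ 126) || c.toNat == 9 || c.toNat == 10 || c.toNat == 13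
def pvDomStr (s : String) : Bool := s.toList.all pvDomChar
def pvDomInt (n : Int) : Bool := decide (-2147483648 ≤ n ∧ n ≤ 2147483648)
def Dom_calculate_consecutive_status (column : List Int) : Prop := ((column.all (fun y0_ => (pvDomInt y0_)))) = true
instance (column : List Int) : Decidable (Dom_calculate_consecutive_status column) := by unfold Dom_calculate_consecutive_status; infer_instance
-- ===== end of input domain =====

-- B replaces A's flat stateful loop by a run-detection pass (signs → maximal runs → s*1..s*L per run); alternative decomposition, same cost.


-- ===== PORT A =====
-- state: (result, last_status, count); loop appends status*count each step
def calculate_consecutive_status (column : List Int) : List Int :=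
  (column.foldl
    (fun (st : List Int × Option Int × Int) num =>
      let status : Int := if num ≥ 0 then 1 else -1
      let count : Int := if some status = st.2.1 then st.2.2 + 1 else 1
      (st.1 ++ [status * count], some status, count))
    ([], none, 0)).1

-- ===== PORT B =====
-- inner while loop of Source B: length of the maximal run of s at the front = takeWhile
-- outer while loop: recursion over the runs of the sign list
def pvRunsB (signs : List Int) : List Int :=
  match signs with
  | [] => []
  | s :: rest =>
      let run := rest.takeWhile (fun x => x == s)
      ((List.range (run.length + 1)).map (fun k => s * (Int.ofNat k + 1)))
        ++ pvRunsB (rest.dropWhile (fun x => x == s))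
termination_by signs.length
decreasing_by
  simp only [List.length_cons]
  exact Nat.lt_succ_of_le (List.length_dropWhile_le _ _)

def calculate_consecutive_status_alt (column : List Int) : List Int :=
  pvRunsB (column.map (fun num => if num ≥ 0 then (1 : Int) else -1))

-- ===== PRECONDITION & SPEC =====
def Spec_calculate_consecutive_status (column : List Int) (out : List Int) : Prop := out = calculate_consecutive_status_alt column
instance (column : List Int) (out : List Int) : Decidable (Spec_calculate_consecutive_status column out) := by unfold Spec_calculate_consecutive_status; infer_instance

-- ===== CLAIM (what is proved, stated in full; the proofs are below) =====
def Claim_equal_calculate_consecutive_status : Prop := ∀ (column : List Int), Dom_calculate_consecutive_status column → Spec_calculate_consecutive_status column (calculate_consecutive_status column)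

-- ===== LEMMAS AND PROOFS =====

-- proof-side recursion equivalent to A's loop, on the precomputed sign list
def fA (ls : Option Int) (c : Int) : List Int → List Int
  | [] => []
  | s :: t =>
      let c' : Int := if some s = ls then c + 1 else 1
      s * c' :: fA (some s) c' t

theorem foldl_eq_fA (column : List Int) (acc : List Int) (ls : Option Int) (c : Int) :
    (column.foldl
      (fun (st : List Int × Option Int × Int) num =>
        let status : Int := if num ≥ 0 then 1 else -1
        let count : Int := if some status = st.2.1 then st.2.2 + 1 else 1
        (st.1 ++ [status * count], some status, count))
      (acc, ls, c)).1
      = acc ++ fA ls c (column.map (fun num => if num ≥ 0 then (1 : Int) else -1)) := by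
  induction column generalizing acc ls c with
  | nil => simp [fA]
  | cons x xs ih =>
      simp only [List.foldl_cons, List.map_cons, fA]
      rw [ih]
      simp

-- fA doesn't depend on the carried state when the next sign differs (count resets to 1)
theorem fA_reset (t : List Int) (s : Int) (c : Int) (h : t.head? ≠ some s) :
    fA (some s) c t = fA none 0 t := by
  cases t with
  | nil => rfl
  | cons y t' =>
      simp only [List.head?_cons, ne_eq, Option.some.injEq] at h
      simp [fA, fun hc : y = s => h hc]

theorem fA_run (n : Nat) (s : Int) (t : List Int) (c : Int) (h : t.head? ≠ some s) :
    fA (some s) c (List.replicate n s ++ t)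
      = (List.range n).map (fun k => s * (c + Int.ofNat k + 1)) ++ fA none 0 t := by
  induction n generalizing c with
  | zero => simpa using fA_reset t s c h
  | succ m ih =>
      simp only [List.replicate_succ, List.cons_append, fA, reduceIte]
      rw [ih (c + 1), List.range_succ_eq_map]
      simp only [List.map_cons, List.map_map, List.cons_append]
      congr 2
      · ring
      · apply List.map_congr_left
        intro k _
        simp only [Function.comp_apply, Int.ofNat_eq_natCast, Nat.succ_eq_add_one]
        push_cast
        ring

theorem takeWhile_eq_replicate (s : Int) (t : List Int) :
    t.takeWhile (fun x => x == s) = List.replicate (t.takeWhile (fun x => x == s)).length s := by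
  induction t with
  | nil => rfl
  | cons y t' ih =>
      by_cases h : y = s
      · subst h
        simp only [List.takeWhile_cons, beq_self_eq_true, if_true, List.length_cons,
          List.replicate_succ]
        conv_lhs => rw [ih]
      · simp [h]

theorem head?_dropWhile_ne (s : Int) (t : List Int) :
    (t.dropWhile (fun x => x == s)).head? ≠ some s := by
  induction t with
  | nil => simp
  | cons y t' ih =>
      by_cases h : y = s
      · simpa [h] using ih
      · simp [h]

theorem fA_eq_pvRunsB (t : List Int) : fA none 0 t = pvRunsB t := by
  induction t using pvRunsB.induct with
  | case1 => simp [fA, pvRunsB]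
  | case2 s rest ih =>
      have hsplit : rest = List.replicate (rest.takeWhile (fun x => x == s)).length s
          ++ rest.dropWhile (fun x => x == s) := by
        conv_lhs => rw [← List.takeWhile_append_dropWhile (p := fun x => x == s) (l := rest)]
        rw [← takeWhile_eq_replicate]
      have hstep : fA none 0 (s :: rest) = s * 1 :: fA (some s) 1 rest := by
        simp [fA]
      rw [hstep]
      conv_lhs => rw [hsplit]
      rw [fA_run _ _ _ _ (head?_dropWhile_ne s rest), ih]
      simp only [pvRunsB]
      rw [List.range_succ_eq_map]
      simp only [List.map_cons, List.map_map, List.cons_append]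
      congr 2
      apply List.map_congr_left
      intro k _
      simp only [Function.comp_apply, Int.ofNat_eq_natCast, Nat.succ_eq_add_one]
      push_cast
      ring

-- ===== VERDICT (by name: the statement is the Claim_ definition above) =====
theorem calculate_consecutive_status_spec : Claim_equal_calculate_consecutive_status := by
  intro column _
  unfold Spec_calculate_consecutive_status calculate_consecutive_status calculate_consecutive_status_alt
  rw [foldl_eq_fA, fA_eq_pvRunsB]
  simp
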